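-- pv_equiv track=rewrite | github.com/pypi-data/pypi-mirror-272 | packages/enpass/enpass-0.1.2-py3-none-any.whl/enpass/base.py | calc_base
-- ===== SOURCE A (Python) =====
-- def calc_base(password):
--     """
--     Calculates the base of the entropy calculation based on the character types present in the password.
--
--     Character Sets:
--         26 lowercase letters
--         26 uppercase letters
--         10 digits
--         36 special characters (assuming common ASCII set)
--
--     Assuming a password is using at least 1 character of each set, the base would be: 98 (26 + 26 + 10 + 36)
--     """
--
--     base = 0
--     character_types = {
--         'lower': False,
--         'upper': False,
--         'digit': False,
--         'special': False
--         }
--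
--     for c in password:
--         #If all characters have been encountered (ie: True) exit the loop early
--         #This helps with efficiency for longer passwords
--         if all(character_types.values()):
--             break
--         if c.islower() and not character_types['lower']:
--             base += 26
--             character_types['lower'] = True
--         elif c.isupper() and not character_types['upper']:
--             base += 26
--             character_types['upper'] = True
--         elif c.isdigit() and not character_types['digit']:
--             base += 10
--             character_types['digit'] = True
--         elif not c.isalnum() and not character_types['special']:
--             base += 36
--             character_types['special'] = True
--
--     return base
-- ===== SOURCE B (Python) =====
-- def calc_base(password):
--     base = 0
--     if any(c.islower() for c in password):
--         base += 26
--     if any(c.isupper() for c in password):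
--         base += 26
--     if any(c.isdigit() for c in password):
--         base += 10
--     if any(not c.isalnum() for c in password):
--         base += 36
--     return base
-- ===== Notes on version B (the rewrite author's own statement) =====
-- stated objective: simpler
-- what changed: Replaces the single stateful loop with a per-character flag dict, elif chain and early-exit break by four independent presence scans (any(...) per character class), adding each class weight once.
import Mathlib
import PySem

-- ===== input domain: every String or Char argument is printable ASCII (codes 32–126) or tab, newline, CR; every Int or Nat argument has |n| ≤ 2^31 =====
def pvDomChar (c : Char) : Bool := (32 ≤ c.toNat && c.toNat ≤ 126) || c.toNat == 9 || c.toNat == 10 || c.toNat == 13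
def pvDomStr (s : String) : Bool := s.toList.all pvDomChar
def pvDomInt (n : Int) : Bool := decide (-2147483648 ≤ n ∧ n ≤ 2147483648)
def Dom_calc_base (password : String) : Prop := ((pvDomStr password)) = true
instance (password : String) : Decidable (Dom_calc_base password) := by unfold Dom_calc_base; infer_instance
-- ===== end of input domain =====

-- B replaces A's stateful flag-dict loop (elif chain + early-exit break) by four independent
-- per-class presence scans summed; same values, simpler decomposition.


-- ===== PORT A =====
-- the for-loop over password with the flag dict as four Bools, the early 'break' and the elif chain kept
def calcBaseLoop : List Char → Int → Bool → Bool → Bool → Bool → Int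
  | [], base, _, _, _, _ => base
  | c :: cs, base, bl, bu, bd, bs =>
    if bl && bu && bd && bs then base
    else if PySem.Chars.islower c && !bl then calcBaseLoop cs (base + 26) true bu bd bs
    else if PySem.Chars.isupper c && !bu then calcBaseLoop cs (base + 26) bl true bd bs
    else if PySem.Chars.isdigit c && !bd then calcBaseLoop cs (base + 10) bl bu true bs
    else if !PySem.Chars.isalnum c && !bs then calcBaseLoop cs (base + 36) bl bu bd true
    else calcBaseLoop cs base bl bu bd bs

def calc_base (password : String) : Int :=
  calcBaseLoop password.toList 0 false false false false

-- ===== PORT B =====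
def calc_base_alt (password : String) : Int :=
  (if password.toList.any PySem.Chars.islower then (26 : Int) else 0)
  + (if password.toList.any PySem.Chars.isupper then (26 : Int) else 0)
  + (if password.toList.any PySem.Chars.isdigit then (10 : Int) else 0)
  + (if password.toList.any (fun c => !PySem.Chars.isalnum c) then (36 : Int) else 0)

-- ===== PRECONDITION & SPEC =====
def Spec_calc_base (password : String) (out : Int) : Prop := out = calc_base_alt password
instance (password : String) (out : Int) : Decidable (Spec_calc_base password out) := by unfold Spec_calc_base; infer_instance

-- ===== CLAIM (what is proved, stated in full; the proofs are below) =====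
def Claim_equal_calc_base : Prop := ∀ (password : String), Dom_calc_base password → Spec_calc_base password (calc_base password)

-- ===== LEMMAS AND PROOFS =====

-- every character falls in exactly one of A's four elif classes
lemma pv_char_class (c : Char) :
    (PySem.Chars.islower c = true ∧ PySem.Chars.isupper c = false ∧ PySem.Chars.isdigit c = false ∧ PySem.Chars.isalnum c = true) ∨
    (PySem.Chars.islower c = false ∧ PySem.Chars.isupper c = true ∧ PySem.Chars.isdigit c = false ∧ PySem.Chars.isalnum c = true) ∨
    (PySem.Chars.islower c = false ∧ PySem.Chars.isupper c = false ∧ PySem.Chars.isdigit c = true ∧ PySem.Chars.isalnum c = true) ∨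
    (PySem.Chars.islower c = false ∧ PySem.Chars.isupper c = false ∧ PySem.Chars.isdigit c = false ∧ PySem.Chars.isalnum c = false) := by
  simp only [PySem.Chars.islower, PySem.Chars.isupper, PySem.Chars.isdigit,
    PySem.Chars.isalnum, PySem.Chars.isalpha, Char.le_def, UInt32.le_iff_toNat_le,
    decide_eq_true_eq, decide_eq_false_iff_not, Bool.and_eq_true, Bool.or_eq_true,
    Bool.and_eq_false_iff, Bool.or_eq_false_iff, not_le,
    show 'a'.val.toNat = 97 from rfl, show 'z'.val.toNat = 122 from rfl,
    show 'A'.val.toNat = 65 from rfl, show 'Z'.val.toNat = 90 from rfl,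
    show '0'.val.toNat = 48 from rfl, show '9'.val.toNat = 57 from rfl]
  omega

-- invariant: the loop adds, to base, each class weight whose flag is unset and whose class occurs
lemma pv_loop_eq (cs : List Char) : ∀ (base : Int) (bl bu bd bs : Bool),
    calcBaseLoop cs base bl bu bd bs =
      base + (if !bl && cs.any PySem.Chars.islower then (26 : Int) else 0)
           + (if !bu && cs.any PySem.Chars.isupper then (26 : Int) else 0)
           + (if !bd && cs.any PySem.Chars.isdigit then (10 : Int) else 0)
           + (if !bs && cs.any (fun c => !PySem.Chars.isalnum c) then (36 : Int) else 0) := by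
  induction cs with
  | nil => intro base bl bu bd bs; simp [calcBaseLoop]
  | cons c cs ih =>
    intro base bl bu bd bs
    rcases pv_char_class c with ⟨h1, h2, h3, h4⟩ | ⟨h1, h2, h3, h4⟩ | ⟨h1, h2, h3, h4⟩ | ⟨h1, h2, h3, h4⟩ <;>
      cases bl <;> cases bu <;> cases bd <;> cases bs <;>
        simp [calcBaseLoop, ih, h1, h2, h3, h4, List.any_cons] <;> ring

-- ===== VERDICT (by name: the statement is the Claim_ definition above) =====
theorem calc_base_spec : Claim_equal_calc_base := by
  intro password _
  unfold Spec_calc_base calc_base calc_base_alt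
  rw [pv_loop_eq]
  simp
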